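-- pv_equiv track=rewrite | github.com/visama/Mixed_vae | data_processing.py | decoder_int_output_layer_size
-- ===== SOURCE A (Python) =====
-- def decoder_int_output_layer_size(variable_types):
--     res = []
--     for variable_type in variable_types:
--         if variable_type == 'int_negBin':
--             res.append(2)
--         if variable_type == 'int_Poisson':
--             res.append(1)
--         if variable_type == 'real_Normal':
--             res.append(2)
--     return(sum(res))
-- ===== SOURCE B (Python) =====
-- def decoder_int_output_layer_size(variable_types):
--     return (2 * variable_types.count('int_negBin')
--             + variable_types.count('int_Poisson')
--             + 2 * variable_types.count('real_Normal'))
-- ===== Notes on version B (the rewrite author's own statement) =====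
-- stated objective: simpler
-- what changed: Replaces the per-element branch chain accumulating an intermediate list with three staged counting passes: count each recognised type with list.count and return the weighted sum of the three counts.
import Mathlib
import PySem

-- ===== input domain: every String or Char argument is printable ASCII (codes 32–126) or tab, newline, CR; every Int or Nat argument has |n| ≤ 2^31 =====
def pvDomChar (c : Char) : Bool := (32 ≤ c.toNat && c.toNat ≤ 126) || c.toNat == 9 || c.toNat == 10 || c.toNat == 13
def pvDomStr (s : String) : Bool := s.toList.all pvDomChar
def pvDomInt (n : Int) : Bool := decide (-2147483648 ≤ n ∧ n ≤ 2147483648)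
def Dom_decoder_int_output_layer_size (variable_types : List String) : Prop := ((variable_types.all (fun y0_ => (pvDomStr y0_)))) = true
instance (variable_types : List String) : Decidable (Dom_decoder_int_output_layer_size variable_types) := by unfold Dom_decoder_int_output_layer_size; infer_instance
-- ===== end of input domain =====

-- B replaces A's per-element branch chain over an intermediate list with three counting passes and a weighted sum (simpler; same cost).


-- ===== PORT A =====
-- builds the list `res` by the three independent if-branches, then sums it
def decoder_int_output_layer_size (variable_types : List String) : Int :=
  let res : List Int :=
    variable_types.foldl (fun res variable_type =>
      let res := if variable_type == "int_negBin" then res ++ [2] else res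
      let res := if variable_type == "int_Poisson" then res ++ [1] else res
      let res := if variable_type == "real_Normal" then res ++ [2] else res
      res) []
  res.sum

-- ===== PORT B =====
-- three counting passes (list.count), then a weighted sum of the counts
def decoder_int_output_layer_size_alt (variable_types : List String) : Int :=
  2 * (PySem.List.count variable_types "int_negBin" : Int)
    + (PySem.List.count variable_types "int_Poisson" : Int)
    + 2 * (PySem.List.count variable_types "real_Normal" : Int)

-- ===== PRECONDITION & SPEC =====
def Spec_decoder_int_output_layer_size (variable_types : List String) (out : Int) : Prop := out = decoder_int_output_layer_size_alt variable_types
instance (variable_types : List String) (out : Int) : Decidable (Spec_decoder_int_output_layer_size variable_types out) := by unfold Spec_decoder_int_output_layer_size; infer_instance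

-- ===== CLAIM (what is proved, stated in full; the proofs are below) =====
def Claim_equal_decoder_int_output_layer_size : Prop := ∀ (variable_types : List String), Dom_decoder_int_output_layer_size variable_types → Spec_decoder_int_output_layer_size variable_types (decoder_int_output_layer_size variable_types)

-- ===== LEMMAS AND PROOFS =====

-- the step of A's fold
def pvStep (res : List Int) (t : String) : List Int :=
  let res := if t == "int_negBin" then res ++ [2] else res
  let res := if t == "int_Poisson" then res ++ [1] else res
  if t == "real_Normal" then res ++ [2] else res

lemma pvStep_sum (res : List Int) (t : String) :
    (pvStep res t).sum = res.sum
      + ((if t = "int_negBin" then 2 else 0) + (if t = "int_Poisson" then 1 else 0)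
          + (if t = "real_Normal" then 2 else 0)) := by
  unfold pvStep
  by_cases h1 : t = "int_negBin" <;> by_cases h2 : t = "int_Poisson" <;>
    by_cases h3 : t = "real_Normal" <;> simp_all <;> ring

lemma pvFold_sum (variable_types : List String) (acc : List Int) :
    (variable_types.foldl pvStep acc).sum
      = acc.sum + decoder_int_output_layer_size_alt variable_types := by
  induction variable_types generalizing acc with
  | nil => simp [decoder_int_output_layer_size_alt, PySem.List.count]
  | cons t ts ih =>
    rw [List.foldl_cons, ih, pvStep_sum]
    unfold decoder_int_output_layer_size_alt
    simp only [PySem.List.count, List.count_cons]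
    by_cases h1 : t = "int_negBin" <;> by_cases h2 : t = "int_Poisson" <;>
      by_cases h3 : t = "real_Normal" <;> simp_all <;> push_cast <;> ring

-- ===== VERDICT (by name: the statement is the Claim_ definition above) =====
theorem decoder_int_output_layer_size_spec : Claim_equal_decoder_int_output_layer_size := by
  intro vt _
  show decoder_int_output_layer_size vt = decoder_int_output_layer_size_alt vt
  have h : decoder_int_output_layer_size vt
      = ([] : List Int).sum + decoder_int_output_layer_size_alt vt := pvFold_sum vt []
  simpa using h
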